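-- pv_equiv track=rewrite | github.com/rajveer43/callflow-tracer | callflow_tracer/ai/dependency_analyzer.py | _build_coupling_matrix
-- ===== SOURCE A (Python) =====
-- from typing import Dict, List, Any, Optional, Set, Tuple
--
-- def _build_coupling_matrix(
--     dep_graph: Dict[str, List[str]]
-- ) -> Dict[str, Dict[str, int]]:
--     """Build coupling matrix showing dependencies between functions."""
--     matrix = {}
--
--     for func in dep_graph:
--         matrix[func] = {}
--         for other_func in dep_graph:
--             if func != other_func:
--                 # Count direct dependencies
--                 if other_func in dep_graph.get(func, []):
--                     matrix[func][other_func] = 1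
--                 else:
--                     matrix[func][other_func] = 0
--
--     return matrix
-- ===== SOURCE B (Python) =====
-- def _build_coupling_matrix(dep_graph):
--     """Zero-initialize all rows, then scatter 1s from the adjacency lists."""
--     funcs = list(dep_graph)
--     matrix = {f: {g: 0 for g in funcs if g != f} for f in funcs}
--     for f, deps in dep_graph.items():
--         row = matrix[f]
--         for dep in deps:
--             if dep != f and dep in row:
--                 row[dep] = 1
--     return matrix
-- ===== Notes on version B (the rewrite author's own statement) =====
-- stated objective: alternative
-- what changed: B zero-initializes every row in one comprehension and then makes a single scatter pass over the adjacency lists setting matrix[f][dep]=1, instead of A's per-pair membership test 'other in dep_graph.get(func, [])' inside the nested key loops.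
import Mathlib
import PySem

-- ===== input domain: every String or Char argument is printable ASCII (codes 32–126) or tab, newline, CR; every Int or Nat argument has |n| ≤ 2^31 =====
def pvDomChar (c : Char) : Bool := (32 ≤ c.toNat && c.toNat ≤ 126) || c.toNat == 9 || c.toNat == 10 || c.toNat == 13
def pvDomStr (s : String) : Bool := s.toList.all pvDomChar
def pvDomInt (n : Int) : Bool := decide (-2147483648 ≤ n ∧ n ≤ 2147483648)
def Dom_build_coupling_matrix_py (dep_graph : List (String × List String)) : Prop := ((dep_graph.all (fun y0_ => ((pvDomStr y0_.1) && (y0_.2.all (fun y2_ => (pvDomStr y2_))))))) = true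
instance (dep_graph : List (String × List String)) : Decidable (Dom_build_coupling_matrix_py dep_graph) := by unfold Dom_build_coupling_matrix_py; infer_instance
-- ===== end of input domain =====

-- B zero-initializes the whole matrix and then scatters 1s from the adjacency lists,
-- instead of testing list membership for every ordered pair as A does (return value only; no mutation of the argument).

-- ===== PORT A =====
def build_coupling_matrix_py (dep_graph : List (String × List String)) : List (String × List (String × Int)) :=
  let d : PySem.Dict String (List String) := PySem.Dict.mk dep_graph
  let matrix : PySem.Dict String (PySem.Dict String Int) :=
    d.keys.foldl (fun m func =>
      d.keys.foldl (fun m other_func =>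
        if func ≠ other_func then
          if (PySem.Dict.getD d func []).contains other_func then
            m.modify func PySem.Dict.empty (fun row => row.insert other_func 1)
          else
            m.modify func PySem.Dict.empty (fun row => row.insert other_func 0)
        else m)
        (m.insert func PySem.Dict.empty))
      PySem.Dict.empty
  matrix.items.map (fun p => (p.1, p.2.items))

-- ===== PORT B =====
-- helper: row[dep] = 1 (dict item assignment on an existing key)
def pvSetOne (row : List (String × Int)) (dep : String) : List (String × Int) :=
  row.map (fun e => if e.1 = dep then (e.1, 1) else e)

-- helper: the inner `for dep in deps` loop of B acting on one row
def pvScatterRow (f : String) (deps : List String) (row : List (String × Int)) : List (String × Int) :=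
  deps.foldl (fun r dep => if dep ≠ f ∧ r.any (fun e => e.1 == dep) then pvSetOne r dep else r) row

def build_coupling_matrix_py_alt (dep_graph : List (String × List String)) : List (String × List (String × Int)) :=
  let funcs := dep_graph.map Prod.fst
  let matrix0 := funcs.map (fun f => (f, (funcs.filter (fun g => g ≠ f)).map (fun g => (g, (0 : Int)))))
  dep_graph.foldl
    (fun m p => m.map (fun row => if row.1 = p.1 then (row.1, pvScatterRow p.1 p.2 row.2) else row))
    matrix0

-- ===== PRECONDITION & SPEC =====
-- The assoc list stands for a Python dict, whose keys are necessarily distinct;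
-- Pre_ only rules out duplicate-key lists, which represent no Python input.
def Pre_build_coupling_matrix_py (dep_graph : List (String × List String)) : Prop :=
  (dep_graph.map Prod.fst).Nodup
instance (dep_graph : List (String × List String)) : Decidable (Pre_build_coupling_matrix_py dep_graph) := by unfold Pre_build_coupling_matrix_py; infer_instance

def pvWitness_build_coupling_matrix_py : (List (String × List String)) :=
  [("a", ["b", "c"]), ("b", []), ("c", ["a", "c"])]

def Spec_build_coupling_matrix_py (dep_graph : List (String × List String)) (out : List (String × List (String × Int))) : Prop := out = build_coupling_matrix_py_alt dep_graph
instance (dep_graph : List (String × List String)) (out : List (String × List (String × Int))) : Decidable (Spec_build_coupling_matrix_py dep_graph out) := by unfold Spec_build_coupling_matrix_py; infer_instance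

-- ===== CLAIM (what is proved, stated in full; the proofs are below) =====
def Claim_equal_build_coupling_matrix_py : Prop := ∀ (dep_graph : List (String × List String)), Dom_build_coupling_matrix_py dep_graph → Pre_build_coupling_matrix_py dep_graph → Spec_build_coupling_matrix_py dep_graph (build_coupling_matrix_py dep_graph)

-- ===== LEMMAS AND PROOFS =====

-- a dict that already holds key k is unchanged by re-inserting its own value
lemma pv_insert_getD_self {κ ν : Type} [BEq κ] [LawfulBEq κ] (d : PySem.Dict κ ν) (k : κ) (d0 : ν)
    (hnd : d.keys.Nodup) (hc : d.contains k = true) : d.insert k (d.getD k d0) = d := by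
  apply PySem.Dict.ext
  rw [PySem.Dict.items_insert_of_contains _ _ hc]
  refine (List.map_congr_left ?_).trans (List.map_id _)
  rintro ⟨a, v⟩ hav
  by_cases hak : a = k
  · subst hak
    have : d.getD a d0 = v := PySem.Dict.getD_of_mem_items _ hav hnd d0
    simp [this]
  · simp [hak]

-- a loop that repeatedly rewrites the same key k is one insert of the folded row
lemma pv_foldl_modify {κ ν α : Type} [BEq κ] [LawfulBEq κ] (l : List α) (k : κ) (d0 : ν)
    (g : ν → α → ν) (m : PySem.Dict κ ν) (hc : m.contains k = true) (hnd : m.keys.Nodup) :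
    l.foldl (fun m x => m.modify k d0 (fun r => g r x)) m
      = m.insert k (l.foldl g (m.getD k d0)) := by
  induction l generalizing m with
  | nil => exact (pv_insert_getD_self m k d0 hnd hc).symm
  | cons x xs ih =>
    have hstep : m.modify k d0 (fun r => g r x) = m.insert k (g (m.getD k d0) x) := rfl
    simp only [List.foldl_cons, hstep]
    rw [ih _ (PySem.Dict.contains_insert_self _ _ _) (PySem.Dict.nodup_keys_insert _ _ _ hnd)]
    rw [PySem.Dict.insert_insert_self, PySem.Dict.getD_insert_self]

-- an outer loop whose body (on nodup states) is an insert of a fresh key appends its rows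
lemma pv_outer {ν : Type} (step : PySem.Dict String ν → String → PySem.Dict String ν)
    (R : String → ν)
    (hstep : ∀ m f, m.keys.Nodup → step m f = m.insert f (R f))
    (l : List String) (m : PySem.Dict String ν) (hm : m.keys.Nodup)
    (hfresh : ∀ f ∈ l, m.contains f = false) (hl : l.Nodup) :
    (l.foldl step m).items = m.items ++ l.map (fun f => (f, R f)) := by
  induction l generalizing m with
  | nil => simp
  | cons f fs ih =>
    simp only [List.foldl_cons, hstep m f hm]
    rw [ih _ (PySem.Dict.nodup_keys_insert _ _ _ hm) ?_ hl.of_cons]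
    · rw [PySem.Dict.items_insert_of_not_contains _ _ (hfresh f (List.mem_cons_self))]
      simp
    · intro g hg
      rw [PySem.Dict.contains_insert]
      have hgf : g ≠ f := by
        rintro rfl
        exact (List.nodup_cons.mp hl).1 hg
      simp [hgf, hfresh g (List.mem_cons_of_mem _ hg)]

-- characterization of port A
lemma pv_A_char (dg : List (String × List String)) (hnd : (dg.map Prod.fst).Nodup) :
    build_coupling_matrix_py dg
      = (dg.map Prod.fst).map (fun f => (f,
          ((dg.map Prod.fst).filter (fun g => f ≠ g)).map (fun g =>
            (g, if (PySem.Dict.getD (PySem.Dict.mk dg) f []).contains g then (1 : Int) else 0)))) := by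
  unfold build_coupling_matrix_py
  simp only []
  have hkeys : (PySem.Dict.mk dg).keys = dg.map Prod.fst := rfl
  set keys := dg.map Prod.fst with hk
  set v : String → String → Int := fun f g =>
    if (PySem.Dict.getD (PySem.Dict.mk dg) f []).contains g then (1 : Int) else 0 with hv
  set R : String → PySem.Dict String Int := fun f =>
    (keys.filter (fun g => decide (f ≠ g))).foldl (fun r other => r.insert other (v f other)) PySem.Dict.empty with hR
  rw [hkeys]
  have houter := pv_outer (fun m func =>
      keys.foldl (fun m other_func =>
        if func ≠ other_func then
          if (PySem.Dict.getD (PySem.Dict.mk dg) func []).contains other_func then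
            m.modify func PySem.Dict.empty (fun row => row.insert other_func 1)
          else
            m.modify func PySem.Dict.empty (fun row => row.insert other_func 0)
        else m)
        (m.insert func PySem.Dict.empty)) R ?_ keys PySem.Dict.empty PySem.Dict.nodup_keys_empty
      (fun f _ => PySem.Dict.contains_empty f) hnd
  · rw [houter]
    simp only [PySem.Dict.empty, List.nil_append, List.map_map]
    refine List.map_congr_left (fun f hf => ?_)
    simp only [Function.comp]
    congr 1
    rw [hR]
    rw [PySem.Dict.items_foldl_insert_fresh _ (fun a => a) (fun g => v f g) _
        (fun a _ => PySem.Dict.contains_empty a) (by simpa using hnd.filter _)]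
    simp [PySem.Dict.empty]
    intro a _ _
    simp [hv]
  · intro m f hm
    -- inner loop
    have hbody : (fun (m : PySem.Dict String (PySem.Dict String Int)) other_func =>
        if f ≠ other_func then
          if (PySem.Dict.getD (PySem.Dict.mk dg) f []).contains other_func then
            m.modify f PySem.Dict.empty (fun row => row.insert other_func 1)
          else
            m.modify f PySem.Dict.empty (fun row => row.insert other_func 0)
        else m)
      = (fun m y => if (decide (f ≠ y)) = true then
            m.modify f PySem.Dict.empty (fun row => row.insert y (v f y)) else m) := by
      funext m y
      by_cases h1 : f ≠ y <;> by_cases h2 : y ∈ PySem.Dict.getD (PySem.Dict.mk dg) f [] <;>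
        simp [h1, h2, hv]
    beta_reduce
    rw [hbody, ← List.foldl_filter]
    rw [pv_foldl_modify _ f PySem.Dict.empty (fun r other => r.insert other (v f other)) _
        (PySem.Dict.contains_insert_self _ _ _) (PySem.Dict.nodup_keys_insert _ _ _ hm)]
    rw [PySem.Dict.insert_insert_self, PySem.Dict.getD_insert_self]

-- a fold of per-row maps is a map of per-row folds
lemma pv_map_foldl_commute {α β : Type} (es : List α) (u : α → β → β) (l : List β) :
    es.foldl (fun m p => m.map (fun row => u p row)) l
      = l.map (fun row => es.foldl (fun r p => u p r) row) := by
  induction es generalizing l with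
  | nil => simp
  | cons p ps ih =>
    simp only [List.foldl_cons, ih, List.map_map]
    rfl

-- rows whose key occurs in no entry are untouched by the scatter pass
lemma pv_rowfold_noop (es : List (String × List String)) (f : String) (x : List (String × Int))
    (h : f ∉ es.map Prod.fst) :
    es.foldl (fun r p => if r.1 = p.1 then (r.1, pvScatterRow p.1 p.2 r.2) else r) (f, x) = (f, x) := by
  induction es with
  | nil => rfl
  | cons p ps ih =>
    have hf : f ≠ p.1 := fun hh => h (by simp [hh])
    simp only [List.foldl_cons, if_neg hf]
    exact ih (fun hh => h (List.mem_cons_of_mem _ hh))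

-- the scatter pass applies exactly the unique matching entry to a row
lemma pv_rowfold (es : List (String × List String)) (hnd : (es.map Prod.fst).Nodup)
    (q : String × List String) (hq : q ∈ es) (x : List (String × Int)) :
    es.foldl (fun r p => if r.1 = p.1 then (r.1, pvScatterRow p.1 p.2 r.2) else r) (q.1, x)
      = (q.1, pvScatterRow q.1 q.2 x) := by
  induction es with
  | nil => cases hq
  | cons p ps ih =>
    rw [List.map_cons] at hnd
    have hnd' := List.nodup_cons.mp hnd
    by_cases hqp : q.1 = p.1
    · have hqq : q = p := by
        rcases List.mem_cons.mp hq with rfl | hmem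
        · rfl
        · exact absurd (hqp ▸ List.mem_map_of_mem (f := Prod.fst) hmem) hnd'.1
      simp only [List.foldl_cons, if_pos hqp]
      rw [hqq, ← hqp]
      exact pv_rowfold_noop _ _ _ (by rw [hqp]; exact hnd'.1)
    · simp only [List.foldl_cons, if_neg hqp]
      have hmem : q ∈ ps := by
        rcases List.mem_cons.mp hq with rfl | hmem
        · exact absurd rfl hqp
        · exact hmem
      exact ih hnd'.2 hmem

-- scattering deps into a keyed row sets exactly the keys that occur in deps to 1
lemma pv_scatter_char (deps : List String) (keys : List String) (f : String)
    (hf : f ∉ keys) (w : String → Int) :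
    pvScatterRow f deps (keys.map (fun g => (g, w g)))
      = keys.map (fun g => (g, if g ∈ deps then 1 else w g)) := by
  induction deps generalizing w with
  | nil => simp [pvScatterRow]
  | cons dep rest ih =>
    unfold pvScatterRow
    simp only [List.foldl_cons]
    have hany : ((keys.map (fun g => (g, w g))).any (fun e => e.1 == dep) = true) ↔ dep ∈ keys := by
      simp [List.any_map, Function.comp_def]
    by_cases hcond : dep ≠ f ∧ dep ∈ keys
    · rw [if_pos ⟨hcond.1, hany.mpr hcond.2⟩]
      have hset : pvSetOne (keys.map (fun g => (g, w g))) dep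
          = keys.map (fun g => (g, if g = dep then 1 else w g)) := by
        unfold pvSetOne
        rw [List.map_map]
        exact List.map_congr_left (fun g _ => by by_cases h : g = dep <;> simp [h])
      rw [hset]
      have := ih (fun g => if g = dep then 1 else w g)
      unfold pvScatterRow at this
      rw [this]
      exact List.map_congr_left (fun g _ => by by_cases h1 : g ∈ rest <;> by_cases h2 : g = dep <;> simp [h1, h2])
    · rw [if_neg (by
        intro hc
        exact hcond ⟨hc.1, hany.mp hc.2⟩)]
      have := ih w
      unfold pvScatterRow at this
      rw [this]
      refine List.map_congr_left (fun g hg => ?_)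
      have hgdep : g ≠ dep := by
        rintro rfl
        rcases not_and_or.mp hcond with h | h
        · exact hf ((not_not.mp h) ▸ hg)
        · exact h hg
      simp [hgdep]

-- characterization of port B
lemma pv_B_char (dg : List (String × List String)) (hnd : (dg.map Prod.fst).Nodup) :
    build_coupling_matrix_py_alt dg
      = dg.map (fun p => (p.1,
          ((dg.map Prod.fst).filter (fun g => g ≠ p.1)).map (fun g =>
            (g, if g ∈ p.2 then (1 : Int) else 0)))) := by
  unfold build_coupling_matrix_py_alt
  rw [pv_map_foldl_commute, List.map_map, List.map_map]
  refine List.map_congr_left (fun p hp => ?_)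
  simp only [Function.comp_def]
  have hrow := pv_rowfold dg hnd p hp
      (((dg.map Prod.fst).filter (fun g => g ≠ p.1)).map (fun g => (g, (0 : Int))))
  rw [hrow]
  congr 1
  have hf : p.1 ∉ (dg.map Prod.fst).filter (fun g => g ≠ p.1) := by simp
  have := pv_scatter_char p.2 ((dg.map Prod.fst).filter (fun g => g ≠ p.1)) p.1 hf (fun _ => 0)
  rw [this]

-- ===== VERDICT (by name: the statement is the Claim_ definition above) =====
theorem build_coupling_matrix_py_spec : Claim_equal_build_coupling_matrix_py := by
  intro dg _ hnd
  unfold Spec_build_coupling_matrix_py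
  rw [pv_A_char dg hnd, pv_B_char dg hnd, List.map_map]
  refine List.map_congr_left (fun p hp => ?_)
  simp only [Function.comp_def]
  have hget : PySem.Dict.getD (PySem.Dict.mk dg) p.1 [] = p.2 :=
    PySem.Dict.getD_of_mem_items _ (by simpa using hp) hnd []
  rw [hget]
  congr 1
  rw [List.filter_congr (fun g _ => decide_eq_decide.mpr ne_comm)]
  refine List.map_congr_left (fun g hg => ?_)
  simp
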